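-- pv_equiv track=rewrite | github.com/kal0ian/HackBulgaria | 1/biggest_difference.py | biggest_difference
-- ===== SOURCE A (Python) =====
-- def biggest_difference(arr):
--     min = arr[0]
--     max = arr[0]
--     for i in arr:
--         if i < min:
--             min = i
--         if i > max:
--             max = i
--     return min - max
-- ===== SOURCE B (Python) =====
-- def biggest_difference(arr):
--     s = sorted(arr)
--     return s[0] - s[-1]
-- ===== Notes on version B (the rewrite author's own statement) =====
-- stated objective: alternative
-- what changed: Replaces A's single-pass running min/max tracking loop with a sort followed by endpoint indexing (s[0] - s[-1]).
import Mathlib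
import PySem

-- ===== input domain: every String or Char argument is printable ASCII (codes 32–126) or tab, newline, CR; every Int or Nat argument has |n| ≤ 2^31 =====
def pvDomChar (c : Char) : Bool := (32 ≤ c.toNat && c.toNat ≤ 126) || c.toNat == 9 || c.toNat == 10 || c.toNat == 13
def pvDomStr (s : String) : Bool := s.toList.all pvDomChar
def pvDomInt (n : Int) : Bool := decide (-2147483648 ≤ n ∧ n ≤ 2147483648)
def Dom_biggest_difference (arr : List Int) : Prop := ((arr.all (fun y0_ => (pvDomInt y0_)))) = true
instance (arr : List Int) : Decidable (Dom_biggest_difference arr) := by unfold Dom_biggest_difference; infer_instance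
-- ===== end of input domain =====

-- B replaces A's running min/max tracking loop with sort-then-endpoint-indexing (alternative decomposition, not faster).


-- ===== PORT A =====
-- arr[0] raises IndexError on []; none-branch is unreachable under Pre_.
def biggest_difference (arr : List Int) : Int :=
  match PySem.List.pyGet? arr 0 with
  | none => 0
  | some a0 =>
    let st := arr.foldl (fun (s : Int × Int) i =>
      (if i < s.1 then i else s.1, if i > s.2 then i else s.2)) (a0, a0)
    st.1 - st.2

-- ===== PORT B =====
-- s = sorted(arr); s[0] - s[-1]; both index accesses raise on [] (unreachable under Pre_).
def biggest_difference_alt (arr : List Int) : Int :=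
  let s := PySem.List.sorted arr (fun x => x) false
  match s with
  | [] => 0
  | h :: t => h - (t.getLastD h)

-- ===== PRECONDITION & SPEC =====
-- A raises IndexError on the empty list (arr[0]); B raises there too (s[0]).
def Pre_biggest_difference (arr : List Int) : Prop := arr ≠ []
instance (arr : List Int) : Decidable (Pre_biggest_difference arr) := by unfold Pre_biggest_difference; infer_instance
def pvWitness_biggest_difference : List Int := [3, -1, 7]
def Spec_biggest_difference (arr : List Int) (out : Int) : Prop := out = biggest_difference_alt arr
instance (arr : List Int) (out : Int) : Decidable (Spec_biggest_difference arr out) := by unfold Spec_biggest_difference; infer_instance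

-- ===== CLAIM (what is proved, stated in full; the proofs are below) =====
def Claim_equal_biggest_difference : Prop := ∀ (arr : List Int), Dom_biggest_difference arr → Pre_biggest_difference arr → Spec_biggest_difference arr (biggest_difference arr)

-- ===== LEMMAS AND PROOFS =====

-- A's loop step is literally (min, max).
theorem step_eq (s : Int × Int) (i : Int) :
    (if i < s.1 then i else s.1, if i > s.2 then i else s.2) = (min s.1 i, max s.2 i) := by
  obtain ⟨a, b⟩ := s
  simp only [Prod.mk.injEq]
  constructor <;> omega

theorem foldl_pair (l : List Int) (a b : Int) :
    l.foldl (fun (s : Int × Int) i =>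
      (if i < s.1 then i else s.1, if i > s.2 then i else s.2)) (a, b)
      = (l.foldl min a, l.foldl max b) := by
  induction l generalizing a b with
  | nil => rfl
  | cons x t ih =>
    simp only [List.foldl_cons]
    have hx : ((if x < a then x else a : Int), (if x > b then x else b : Int)) = (min a x, max b x) := step_eq (a, b) x
    rw [hx]
    exact ih _ _

theorem getLastD_eq_getElem (t : List Int) (h : Int) :
    t.getLastD h = (h :: t)[(h :: t).length - 1]'(by simp) := by
  cases t with
  | nil => rfl
  | cons y ys =>
    rw [List.getLastD_eq_getLast?, List.getLast?_eq_getElem?]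
    simp
    rfl

-- head of sorted = foldl min, last of sorted = foldl max
theorem sorted_head_last (a : Int) (rest : List Int) (h : Int) (t : List Int)
    (hs : PySem.List.sorted (a :: rest) (fun x => x) false = h :: t) :
    h = rest.foldl min a ∧ t.getLastD h = rest.foldl max a := by
  have hperm := PySem.List.sorted_perm (a :: rest) (fun x : Int => x) false
  rw [hs] at hperm
  have hmem : ∀ y, y ∈ h :: t ↔ y ∈ a :: rest := fun y => hperm.mem_iff
  constructor
  · -- head = min
    have hmin := PySem.List.foldl_min_le rest a
    have hle : ∀ y ∈ a :: rest, h ≤ y := PySem.List.key_head_sorted_le (a :: rest) (fun x => x) hs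
    have hhin : h ∈ a :: rest := (hmem h).1 (by simp)
    have hfin : rest.foldl min a ∈ a :: rest := by
      rcases PySem.List.foldl_min_mem rest a with h1 | h1
      · rw [h1]; simp
      · simp [h1]
    refine le_antisymm (hle _ hfin) ?_
    rcases List.mem_cons.1 hhin with hh | hh
    · rw [hh]; exact hmin.1
    · exact hmin.2 _ hh
  · -- last = max
    have hmax := PySem.List.le_foldl_max rest a
    have hlin : t.getLastD h ∈ h :: t := by
      rw [getLastD_eq_getElem]; exact List.getElem_mem _
    have hfin : rest.foldl max a ∈ a :: rest := by
      rcases PySem.List.foldl_max_mem rest a with h1 | h1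
      · rw [h1]; simp
      · simp [h1]
    have hge : ∀ y ∈ a :: rest, y ≤ t.getLastD h := by
      intro y hy
      have hy' : y ∈ h :: t := (hmem y).2 hy
      obtain ⟨p, hp, hpe⟩ := List.mem_iff_getElem.1 hy'
      rw [getLastD_eq_getElem]
      have := PySem.List.sorted_id_getElem_mono (xs := a :: rest)
        (p := p) (q := (h :: t).length - 1)
        (by omega) (by rw [hs]; omega)
      simp only [hs] at this
      omega
    have hle2 : t.getLastD h ≤ rest.foldl max a := by
      rcases List.mem_cons.1 ((hmem _).1 hlin) with hh | hh
      · rw [hh]; exact hmax.1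
      · exact hmax.2 _ hh
    exact le_antisymm hle2 (hge _ hfin)

-- ===== VERDICT (by name: the statement is the Claim_ definition above) =====
theorem biggest_difference_spec : Claim_equal_biggest_difference := by
  intro arr _ hpre
  cases arr with
  | nil => exact absurd rfl hpre
  | cons a rest =>
    unfold Spec_biggest_difference biggest_difference biggest_difference_alt
    have hget : PySem.List.pyGet? (a :: rest) (0 : Int) = some a := by
      simp [PySem.List.pyGet?, PySem.List.pyIdx?]
    rw [hget]
    rcases hnil : PySem.List.sorted (a :: rest) (fun x : Int => x) false with _ | ⟨h, t⟩
    · exact absurd ((PySem.List.sorted_eq_nil_iff (a :: rest) (fun x => x) false).mp hnil) (by simp)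
    · obtain ⟨h1, h2⟩ := sorted_head_last a rest h t hnil
      simp only [foldl_pair, List.foldl_cons, lt_self_iff_false, gt_iff_lt, if_false]
      omega
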